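-- pv_equiv track=rewrite | github.com/LEANDERANTONY/HelpmateAI_RAG_QA_System | src/ingest/service.py | _dedupe_google_pages
-- ===== SOURCE A (Python) =====
-- def _dedupe_google_pages(pages: list[dict[str, str]]) -> list[dict[str, str]]:
--     by_label: dict[str, dict[str, str]] = {}
--     for page in pages:
--         label = page.get("page_label", "Document")
--         text = page.get("text", "")
--         existing = by_label.get(label)
--         if existing is None or len(text) > len(existing.get("text", "")):
--             by_label[label] = page
--
--     def sort_key(item: tuple[str, dict[str, str]]) -> tuple[int, str]:
--         label = item[0]
--         if label.startswith("Page "):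
--             try:
--                 return int(label.split()[1]), label
--             except (IndexError, ValueError):
--                 return 10**9, label
--         return 10**9, label
--
--     return [page for _, page in sorted(by_label.items(), key=sort_key)]
-- ===== SOURCE B (Python) =====
-- def _dedupe_google_pages(pages: list[dict[str, str]]) -> list[dict[str, str]]:
--     # Phase 1: collect — group the pages by label, in first-seen label order.
--     groups: dict[str, list[dict[str, str]]] = {}
--     for page in pages:
--         label = page.get("page_label", "Document")
--         groups[label] = groups.get(label, []) + [page]
--
--     # Phase 2: reduce — each group keeps its first longest-text page
--     # (max returns the first maximal element, matching first-wins on ties).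
--     best = {label: max(grp, key=lambda p: len(p.get("text", "")))
--             for label, grp in groups.items()}
--
--     def sort_key(item: tuple[str, dict[str, str]]) -> tuple[int, str]:
--         label = item[0]
--         if label.startswith("Page "):
--             try:
--                 return int(label.split()[1]), label
--             except (IndexError, ValueError):
--                 return 10**9, label
--         return 10**9, label
--
--     return [page for _, page in sorted(best.items(), key=sort_key)]
-- ===== Notes on version B (the rewrite author's own statement) =====
-- stated objective: alternative
-- what changed: Replaces A's single-pass keep-the-longer dict update with a two-phase collect-then-reduce: group all pages by label first, then pick each group's first longest-text page with max(key=len).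
import Mathlib
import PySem

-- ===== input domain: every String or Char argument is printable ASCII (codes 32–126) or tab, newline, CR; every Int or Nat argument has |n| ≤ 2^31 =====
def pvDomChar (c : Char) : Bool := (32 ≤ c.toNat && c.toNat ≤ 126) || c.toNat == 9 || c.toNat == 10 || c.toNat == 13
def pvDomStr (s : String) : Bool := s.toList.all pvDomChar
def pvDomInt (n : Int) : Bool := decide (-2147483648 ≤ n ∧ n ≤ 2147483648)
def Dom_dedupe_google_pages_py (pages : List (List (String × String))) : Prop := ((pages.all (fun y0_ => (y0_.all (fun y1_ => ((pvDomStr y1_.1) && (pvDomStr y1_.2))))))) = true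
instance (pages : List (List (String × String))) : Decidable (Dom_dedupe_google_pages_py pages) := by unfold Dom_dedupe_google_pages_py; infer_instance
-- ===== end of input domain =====

-- B replaces A's one-pass keep-the-longer dict update by a collect-then-reduce two-phase
-- structure (group pages by label, then take each group's first longest-text page); same results.


-- shared subroutines (identical in both Python sources): dict .get with default, and sort_key
def pvGet (page : List (String × String)) (k dflt : String) : String :=
  (PySem.Dict.ofList page).getD k dflt

-- sort_key's first component: int(label.split()[1]) if label.startswith("Page "), else 10**9
-- (IndexError/ValueError caught → 10**9); the second component is the label itself.
def pvSortKey1 (it : String × List (String × String)) : Int :=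
  if PySem.Str.startswith it.1 "Page " then
    match PySem.List.pyGet? (PySem.Str.split₀ it.1) 1 with
    | none => 10 ^ 9
    | some tok =>
        match PySem.Int.ofStr? tok with
        | none => 10 ^ 9
        | some n => n
  else 10 ^ 9

-- ===== PORT A =====
-- loop body of A: keep the incoming page iff no page with this label yet, or its text is strictly longer
def pvStepA (d : PySem.Dict String (List (String × String))) (page : List (String × String)) :
    PySem.Dict String (List (String × String)) :=
  let label := pvGet page "page_label" "Document"
  let text := pvGet page "text" ""
  match d.get? label with
  | none => d.insert label page
  | some existing =>
      if PySem.Str.len text > PySem.Str.len (pvGet existing "text" "") then d.insert label page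
      else d

def dedupe_google_pages_py (pages : List (List (String × String))) : List (List (String × String)) :=
  let by_label := pages.foldl pvStepA PySem.Dict.empty
  (PySem.List.sorted2 by_label.items pvSortKey1 (fun it => it.1)).map (fun it => it.2)

-- ===== PORT B =====
-- grouping loop body of B: groups[label] = groups.get(label, []) + [page]
def pvStepB (g : PySem.Dict String (List (List (String × String)))) (page : List (String × String)) :
    PySem.Dict String (List (List (String × String))) :=
  let label := pvGet page "page_label" "Document"
  g.insert label (g.getD label [] ++ [page])

-- max(grp, key=lambda p: len(p.get("text", ""))) — first maximal element
def pvChamp (g : List (List (String × String))) : List (String × String) :=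
  (PySem.List.max? g (fun p => PySem.Str.len (pvGet p "text" ""))).getD []

def dedupe_google_pages_py_alt (pages : List (List (String × String))) : List (List (String × String)) :=
  let groups := pages.foldl pvStepB PySem.Dict.empty
  let best := groups.items.map (fun it => (it.1, pvChamp it.2))
  (PySem.List.sorted2 best pvSortKey1 (fun it => it.1)).map (fun it => it.2)

-- ===== PRECONDITION & SPEC =====
def Spec_dedupe_google_pages_py (pages : List (List (String × String))) (out : List (List (String × String))) : Prop := out = dedupe_google_pages_py_alt pages
instance (pages : List (List (String × String))) (out : List (List (String × String))) : Decidable (Spec_dedupe_google_pages_py pages out) := by unfold Spec_dedupe_google_pages_py; infer_instance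

-- ===== CLAIM (what is proved, stated in full; the proofs are below) =====
def Claim_equal_dedupe_google_pages_py : Prop := ∀ (pages : List (List (String × String))), Dom_dedupe_google_pages_py pages → Spec_dedupe_google_pages_py pages (dedupe_google_pages_py pages)

-- ===== LEMMAS AND PROOFS =====

-- one foldl step of max?
theorem pvMax?_append (g : List (List (String × String))) (p : List (String × String)) :
    PySem.List.max? (g ++ [p]) (fun q => PySem.Str.len (pvGet q "text" "")) =
      match PySem.List.max? g (fun q => PySem.Str.len (pvGet q "text" "")) with
      | none => some p
      | some m =>
          if PySem.Str.len (pvGet m "text" "") < PySem.Str.len (pvGet p "text" "") then some p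
          else some m := by
  cases hm : PySem.List.max? g (fun q => PySem.Str.len (pvGet q "text" "")) with
  | none =>
      simp only [PySem.List.max?] at hm ⊢
      rw [List.foldl_append, hm]
      rfl
  | some m =>
      simp only [PySem.List.max?] at hm ⊢
      rw [List.foldl_append, hm]
      rfl

theorem pvChamp_singleton (p : List (String × String)) : pvChamp [p] = p := by
  simp [pvChamp, PySem.List.max?]

theorem pvChamp_append (g : List (List (String × String))) (p : List (String × String)) (h : g ≠ []) :
    pvChamp (g ++ [p]) =
      if PySem.Str.len (pvGet (pvChamp g) "text" "") < PySem.Str.len (pvGet p "text" "") then p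
      else pvChamp g := by
  obtain ⟨m, hm⟩ : ∃ m, PySem.List.max? g (fun q => PySem.Str.len (pvGet q "text" "")) = some m := by
    cases hmax : PySem.List.max? g (fun q => PySem.Str.len (pvGet q "text" "")) with
    | none => exact absurd ((PySem.List.max?_eq_none_iff _ _).mp hmax) h
    | some m => exact ⟨m, rfl⟩
  have hstep := pvMax?_append g p
  rw [hm] at hstep
  simp only [pvChamp, hm, hstep, Option.getD_some]
  split_ifs <;> simp

-- the loop invariant: A's dict is B's groups dict with each group reduced to its champion
theorem pvLoop_items : ∀ (pages : List (List (String × String)))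
    (dA : PySem.Dict String (List (String × String)))
    (gB : PySem.Dict String (List (List (String × String)))),
    dA.items = gB.items.map (fun it => (it.1, pvChamp it.2)) →
    gB.keys.Nodup →
    (∀ it ∈ gB.items, it.2 ≠ []) →
    (pages.foldl pvStepA dA).items =
      (pages.foldl pvStepB gB).items.map (fun it => (it.1, pvChamp it.2)) := by
  intro pages
  induction pages with
  | nil => intro dA gB h1 _ _; simpa using h1
  | cons p t ih =>
      intro dA gB h1 h2 h3
      have hkeys : dA.keys = gB.keys := by
        simp only [PySem.Dict.keys, h1, List.map_map]
        rfl
      set l := pvGet p "page_label" "Document" with hl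
      have hAkeysNodup : dA.keys.Nodup := hkeys ▸ h2
      by_cases hc : gB.contains l = true
      · -- label already present: A compares lengths, B appends to the group
        obtain ⟨g, hg⟩ : ∃ g, gB.get? l = some g := by
          have h' := PySem.Dict.contains_eq_isSome_get? gB l
          rw [hc] at h'
          exact Option.isSome_iff_exists.mp h'.symm
        have hmemB : (l, g) ∈ gB.items := PySem.Dict.mem_items_of_get?_eq_some _ hg
        have hAc : dA.contains l = true := by
          rw [PySem.Dict.contains_iff_mem_keys] at hc ⊢
          rwa [hkeys]
        have hmemA : (l, pvChamp g) ∈ dA.items := by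
          rw [h1]; exact List.mem_map_of_mem hmemB
        have hgetA : dA.get? l = some (pvChamp g) :=
          PySem.Dict.get?_of_mem_items _ hmemA hAkeysNodup
        have hgne : g ≠ [] := h3 _ hmemB
        have huniq : ∀ q ∈ gB.items, q.1 = l → q.2 = g := by
          intro q hq hq1
          have : gB.get? l = some q.2 := by
            rw [← hq1]; exact PySem.Dict.get?_of_mem_items _ (by simpa using hq) h2
          rw [hg] at this; exact (Option.some_inj.mp this).symm
        -- the stepped dicts
        have hstepB : pvStepB gB p = gB.insert l (g ++ [p]) := by
          simp [pvStepB, ← hl, PySem.Dict.getD_of_get?_eq_some _ _ hg]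
        have hitemsB : (pvStepB gB p).items =
            gB.items.map (fun q => if q.1 == l then (l, g ++ [p]) else q) := by
          rw [hstepB, PySem.Dict.items_insert_of_contains _ _ hc]
        have hnewItems : (pvStepB gB p).items.map (fun it => (it.1, pvChamp it.2)) =
            gB.items.map (fun q =>
              if q.1 == l then (l, pvChamp (g ++ [p])) else (q.1, pvChamp q.2)) := by
          rw [hitemsB, List.map_map]
          refine List.map_congr_left (fun q hq => ?_)
          by_cases hql : q.1 = l
          · simp [hql]
          · simp [hql]
        have ihOK : ∀ dA' : PySem.Dict String (List (String × String)),
            dA'.items = (pvStepB gB p).items.map (fun it => (it.1, pvChamp it.2)) →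
            (List.foldl pvStepA dA' t).items =
              (List.foldl pvStepB (pvStepB gB p) t).items.map (fun it => (it.1, pvChamp it.2)) := by
          intro dA' h1'
          refine ih dA' (pvStepB gB p) h1' ?_ ?_
          · rw [hstepB]; exact PySem.Dict.nodup_keys_insert _ _ _ h2
          · intro it hit
            rw [hitemsB] at hit
            obtain ⟨q, hq, hqe⟩ := List.mem_map.mp hit
            by_cases hql : q.1 = l
            · simp only [hql, BEq.rfl, if_pos] at hqe
              rw [← hqe]; simp
            · simp only [beq_iff_eq, hql, if_neg, not_false_iff] at hqe
              rw [← hqe]; exact h3 q hq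
        simp only [List.foldl_cons]
        by_cases hlen : PySem.Str.len (pvGet (pvChamp g) "text" "") <
            PySem.Str.len (pvGet p "text" "")
        · -- A replaces in place; B's new champion is p
          have hstepA : pvStepA dA p = dA.insert l p := by
            simp only [pvStepA, ← hl, hgetA]
            split_ifs with hi
            · rfl
            · exact absurd hlen hi
          apply ihOK
          rw [hstepA, PySem.Dict.items_insert_of_contains _ _ hAc, hnewItems, h1, List.map_map]
          refine List.map_congr_left (fun q hq => ?_)
          by_cases hql : q.1 = l
          · have hch : pvChamp (g ++ [p]) = p := by
              rw [pvChamp_append g p hgne, if_pos hlen]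
            simp [hql, hch]
          · simp [hql]
        · -- A keeps the existing page; B's champion is unchanged
          have hstepA : pvStepA dA p = dA := by
            simp only [pvStepA, ← hl, hgetA]
            split_ifs with hi
            · exact absurd hi hlen
            · rfl
          apply ihOK
          rw [hstepA, hnewItems, h1]
          refine List.map_congr_left (fun q hq => ?_)
          by_cases hql : q.1 = l
          · have hch : pvChamp (g ++ [p]) = pvChamp g := by
              rw [pvChamp_append g p hgne, if_neg hlen]
            have hq2 : q.2 = g := huniq q hq hql
            simp [hql, hq2, hch]
          · simp [hql]
      · -- fresh label: both dicts append a new entry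
        have hc' : gB.contains l = false := by simpa using hc
        have hAc : dA.contains l = false := by
          by_contra hcon
          have hmk := (PySem.Dict.contains_iff_mem_keys dA l).mp (by simpa using hcon)
          rw [hkeys] at hmk
          exact hc ((PySem.Dict.contains_iff_mem_keys gB l).mpr hmk)
        have hgetA : dA.get? l = none := (PySem.Dict.get?_eq_none_iff_contains dA l).mpr hAc
        have hstepA : pvStepA dA p = dA.insert l p := by
          simp [pvStepA, ← hl, hgetA]
        have hstepB : pvStepB gB p = gB.insert l [p] := by
          simp [pvStepB, ← hl, PySem.Dict.getD_of_not_contains _ _ hc']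
        simp only [List.foldl_cons]
        refine ih _ _ ?_ ?_ ?_
        · rw [hstepA, hstepB, PySem.Dict.items_insert_of_not_contains _ _ hAc,
            PySem.Dict.items_insert_of_not_contains _ _ hc', List.map_append, h1,
            List.map_cons, pvChamp_singleton]
          rfl
        · rw [hstepB]; exact PySem.Dict.nodup_keys_insert _ _ _ h2
        · intro it hit
          rw [hstepB, PySem.Dict.items_insert_of_not_contains _ _ hc'] at hit
          rcases List.mem_append.mp hit with h | h
          · exact h3 it h
          · simp only [List.mem_singleton] at h
            rw [h]; simp

-- ===== VERDICT (by name: the statement is the Claim_ definition above) =====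
theorem dedupe_google_pages_py_spec : Claim_equal_dedupe_google_pages_py := by
  intro pages _
  unfold Spec_dedupe_google_pages_py dedupe_google_pages_py dedupe_google_pages_py_alt
  have h := pvLoop_items pages PySem.Dict.empty PySem.Dict.empty (by rfl)
    PySem.Dict.nodup_keys_empty (by intro it hit; simp [PySem.Dict.empty] at hit)
  show (PySem.List.sorted2 (List.foldl pvStepA PySem.Dict.empty pages).items
      pvSortKey1 (fun it => it.1)).map (fun it => it.2) = _
  rw [h]
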